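-- pv_equiv track=rewrite | github.com/ensaryesir/MLP-From-Scratch-GUI | utils/matrix_ops.py | argmax_axis1
-- ===== SOURCE A (Python) =====
-- def argmax_axis1(A):
--     """Find argmax along axis 1 (row-wise max index)"""
--     result = []
--     for row in A:
--         if row:
--             max_idx = 0
--             max_val = row[0]
--             for j in range(1, len(row)):
--                 if row[j] > max_val:
--                     max_val = row[j]
--                     max_idx = j
--             result.append(max_idx)
--         else:
--             result.append(0)
--     return result
-- ===== SOURCE B (Python) =====
-- def argmax_axis1(A):
--     """Find argmax along axis 1 (row-wise max index)"""
--     return [row.index(max(row)) if row else 0 for row in A]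
-- ===== Notes on version B (the rewrite author's own statement) =====
-- stated objective: idiomatic
-- what changed: Replaces the explicit accumulator loop with index-tracking inner scan by a comprehension that computes each row's answer in two library passes: max(row) then row.index(max), keeping first-occurrence tie-breaking.
import Mathlib
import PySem

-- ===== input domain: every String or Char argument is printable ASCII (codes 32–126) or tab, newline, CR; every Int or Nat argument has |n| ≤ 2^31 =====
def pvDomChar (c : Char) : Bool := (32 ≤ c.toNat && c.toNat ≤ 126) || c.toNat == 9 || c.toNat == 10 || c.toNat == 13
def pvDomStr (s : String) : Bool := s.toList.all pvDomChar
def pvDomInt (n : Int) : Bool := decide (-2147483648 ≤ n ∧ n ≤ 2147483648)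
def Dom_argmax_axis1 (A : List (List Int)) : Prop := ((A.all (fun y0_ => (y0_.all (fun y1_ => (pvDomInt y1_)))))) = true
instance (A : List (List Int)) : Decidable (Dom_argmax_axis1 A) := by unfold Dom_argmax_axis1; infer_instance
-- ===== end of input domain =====

-- B replaces A's accumulator loop with single-pass index-tracking inner scan by a comprehension
-- computing each row in two library passes (max, then first index of it); objective: idiomatic.


-- ===== PORT A =====
-- inner loop body: 'if row[j] > max_val: max_val = row[j]; max_idx = j'  (state = (max_idx, max_val))
def argmaxStep (row : List Int) (s : Int × Int) (j : Int) : Int × Int :=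
  if PySem.List.pyGetD row j 0 > s.2 then (j, PySem.List.pyGetD row j 0) else s

def argmax_axis1 (A : List (List Int)) : List Int :=
  A.foldl
    (fun result row =>
      if row ≠ [] then
        let s := (PySem.List.pyRange 1 (row.length : Int) 1).foldl (argmaxStep row)
                   (0, PySem.List.pyGetD row 0 0)
        result ++ [s.1]
      else
        result ++ [0])
    []

-- ===== PORT B =====
-- 'row.index(max(row)) if row else 0'
def rowArgmax (row : List Int) : Int :=
  if row ≠ [] then
    (((PySem.List.index? row ((PySem.List.max? row (fun x => x)).getD 0)).getD 0 : Nat) : Int)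
  else 0

def argmax_axis1_alt (A : List (List Int)) : List Int := A.map rowArgmax

-- ===== PRECONDITION & SPEC =====
def Spec_argmax_axis1 (A : List (List Int)) (out : List Int) : Prop := out = argmax_axis1_alt A
instance (A : List (List Int)) (out : List Int) : Decidable (Spec_argmax_axis1 A out) := by unfold Spec_argmax_axis1; infer_instance

-- ===== CLAIM (what is proved, stated in full; the proofs are below) =====
def Claim_equal_argmax_axis1 : Prop := ∀ (A : List (List Int)), Dom_argmax_axis1 A → Spec_argmax_axis1 A (argmax_axis1 A)

-- ===== LEMMAS AND PROOFS =====

-- structural form of A's inner index loop (proof helper only)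
def auxRec : List Int → Nat → Int × Int → Int × Int
  | [], _, s => s
  | x :: xs, j, s => auxRec xs (j + 1) (if x > s.2 then ((j : Int), x) else s)

-- the pyRange fold over indices k..len-1 is the structural recursion over row.drop k
theorem range_fold_eq_auxRec (row : List Int) (k : Nat) (hk : k ≤ row.length) (s : Int × Int) :
    (PySem.List.pyRange (k : Int) (row.length : Int) 1).foldl (argmaxStep row) s
      = auxRec (row.drop k) k s := by
  induction hn : row.length - k generalizing k s with
  | zero =>
    have hk' : row.length ≤ k := by omega
    rw [PySem.List.pyRange_one_eq_nil (by exact_mod_cast hk'), List.drop_eq_nil_of_le hk']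
    rfl
  | succ n ih =>
    have hlt : k < row.length := by omega
    rw [PySem.List.pyRange_one_cons (by exact_mod_cast hlt)]
    have hdrop : row.drop k = row[k] :: row.drop (k + 1) := List.drop_eq_getElem_cons hlt
    rw [hdrop]
    show (PySem.List.pyRange ((k : Int) + 1) (row.length : Int) 1).foldl (argmaxStep row) (argmaxStep row s k)
        = auxRec (row.drop (k+1)) (k+1) (if row[k] > s.2 then ((k:Int), row[k]) else s)
    have hget : PySem.List.pyGetD row (k : Int) 0 = row[k] := by
      rw [PySem.List.pyGetD_eq_getElem row 0 (by positivity) (by exact_mod_cast hlt)]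
      simp
    have hcast : ((k : Int) + 1) = ((k + 1 : Nat) : Int) := by push_cast; ring
    rw [hcast, ih (k+1) (by omega) (argmaxStep row s (k : Int)) (by omega)]
    congr 1
    simp [argmaxStep, hget]

-- max? with identity key returns exactly the greatest value (unique on Int, so no tie subtlety)
theorem max?_id_eq (xs : List Int) (m : Int) (hm : m ∈ xs) (hmax : ∀ y ∈ xs, y ≤ m) :
    PySem.List.max? xs (fun x => x) = some m := by
  cases h : PySem.List.max? xs (fun x => x) with
  | none =>
    rw [PySem.List.max?_eq_none_iff] at h
    simp [h] at hm
  | some m' =>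
    have h1 := PySem.List.max?_mem h
    have h2 := PySem.List.max?_isMax h m hm
    have h3 := hmax m' h1
    simp only [] at h2
    rw [le_antisymm h3 h2]

-- invariant of A's scan: if (i, m) is B's answer for the prefix 'pre', running the loop
-- over the rest yields B's answer for the whole row
theorem auxRec_invariant (xs : List Int) (pre : List Int) (i : Nat) (m : Int)
    (hm : PySem.List.max? pre (fun x => x) = some m)
    (hi : PySem.List.index? pre m = some i) :
    auxRec xs pre.length ((i : Int), m)
      = ((((PySem.List.index? (pre ++ xs)
              ((PySem.List.max? (pre ++ xs) (fun x => x)).getD 0)).getD 0 : Nat) : Int),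
         (PySem.List.max? (pre ++ xs) (fun x => x)).getD 0) := by
  induction xs generalizing pre i m with
  | nil =>
    rw [List.append_nil, hm]
    simp only [Option.getD_some]
    rw [hi]
    simp [auxRec]
  | cons x xs ih =>
    have hmemm : m ∈ pre := PySem.List.max?_mem hm
    have hmax : ∀ y ∈ pre, y ≤ m := by
      intro y hy
      have := PySem.List.max?_isMax hm y hy
      simpa using this
    show auxRec xs (pre.length + 1) (if x > m then ((pre.length : Int), x) else ((i:Int), m)) = _
    have happ : pre ++ x :: xs = (pre ++ [x]) ++ xs := by simp
    rw [happ]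
    by_cases hx : x > m
    · rw [if_pos hx]
      have hnotin : x ∉ pre := fun hin => absurd (hmax x hin) (by omega)
      have h1 : PySem.List.max? (pre ++ [x]) (fun y => y) = some x := by
        apply max?_id_eq _ _ (by simp)
        intro y hy
        rw [List.mem_append] at hy
        rcases hy with h | h
        · exact le_of_lt (lt_of_le_of_lt (hmax y h) hx)
        · simp at h; omega
      have h2 : PySem.List.index? (pre ++ [x]) x = some pre.length :=
        PySem.List.index?_append_singleton_self pre x hnotin
      have := ih (pre ++ [x]) pre.length x h1 h2
      simpa using this
    · rw [if_neg hx]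
      have h1 : PySem.List.max? (pre ++ [x]) (fun y => y) = some m := by
        apply max?_id_eq _ _ (by simp [hmemm])
        intro y hy
        rw [List.mem_append] at hy
        rcases hy with h | h
        · exact hmax y h
        · simp at h; omega
      have h2 : PySem.List.index? (pre ++ [x]) m = some i := by
        rw [PySem.List.index?_append_of_mem [x] hmemm]
        exact hi
      have := ih (pre ++ [x]) i m h1 h2
      simpa using this

-- per-row agreement of the two programs
theorem row_eq (row : List Int) (h : row ≠ []) :
    ((PySem.List.pyRange 1 (row.length : Int) 1).foldl (argmaxStep row)
       (0, PySem.List.pyGetD row 0 0)).1 = rowArgmax row := by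
  cases row with
  | nil => exact absurd rfl h
  | cons r rest =>
    have hget : PySem.List.pyGetD (r :: rest) (0:Int) 0 = r := by
      rw [PySem.List.pyGetD_of_nonneg _ _ le_rfl]; rfl
    have hfold := range_fold_eq_auxRec (r :: rest) 1 (by simp) ((0:Int), r)
    simp only [Nat.cast_one, List.drop_one, List.tail_cons] at hfold
    rw [hget, hfold]
    have hm : PySem.List.max? [r] (fun x => x) = some r :=
      max?_id_eq _ _ (by simp) (by intro y hy; simp at hy; omega)
    have hi : PySem.List.index? [r] r = some 0 := PySem.List.index?_cons_self r []
    have := auxRec_invariant rest [r] 0 r hm hi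
    simp only [List.length_cons, List.length_nil, List.singleton_append] at this
    simp only [Nat.cast_zero, zero_add] at this
    rw [this]
    simp [rowArgmax]

-- ===== VERDICT (by name: the statement is the Claim_ definition above) =====
theorem argmax_axis1_spec : Claim_equal_argmax_axis1 := by
  intro A _
  unfold Spec_argmax_axis1 argmax_axis1 argmax_axis1_alt
  have hbody : (fun (result row : List Int) =>
      if row ≠ [] then
        let s := (PySem.List.pyRange 1 (row.length : Int) 1).foldl (argmaxStep row)
                   (0, PySem.List.pyGetD row 0 0)
        result ++ [s.1]
      else
        result ++ [0])
      = fun (result row : List Int) => result ++ [rowArgmax row] := by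
    funext result row
    by_cases hrow : row = []
    · simp [hrow, rowArgmax]
    · simp only [if_pos (show row ≠ [] from hrow)]
      rw [row_eq row hrow]
  rw [hbody, PySem.List.foldl_append_singleton_eq_map]
  simp
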